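-- pv_equiv track=rewrite | github.com/maxfil333/rates_mail_service | src/utils.py | format_csv_to_table
-- ===== SOURCE A (Python) =====
-- def format_csv_to_table(csv_text):
--     lines = csv_text.strip().split('\n')
--     rows = [line.split(',') for line in lines]
--
--     html = ['<table border="1" style="border-collapse: collapse; padding: 5px;">']
--     for i, row in enumerate(rows):
--         html.append('<tr>')
--         for cell in row:
--             tag = 'th' if i == 0 else 'td'
--             html.append(f'  <{tag}>{cell.strip()}</{tag}>')
--         html.append('</tr>')
--     html.append('</table>')
--
--     return '\n'.join(html)
-- ===== SOURCE B (Python) =====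
-- def format_csv_to_table(csv_text):
--     # single character-level scan: no split(), the HTML is emitted as the text is read
--     out = ['<table border="1" style="border-collapse: collapse; padding: 5px;">\n<tr>\n']
--     tag = 'th'
--     cell = []
--     for ch in csv_text.strip():
--         if ch == ',':
--             out.append(f'  <{tag}>{"".join(cell).strip()}</{tag}>\n')
--             cell = []
--         elif ch == '\n':
--             out.append(f'  <{tag}>{"".join(cell).strip()}</{tag}>\n</tr>\n<tr>\n')
--             cell = []
--             tag = 'td'
--         else:
--             cell.append(ch)
--     out.append(f'  <{tag}>{"".join(cell).strip()}</{tag}>\n</tr>\n</table>')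
--     return ''.join(out)
-- ===== Notes on version B (the rewrite author's own statement) =====
-- stated objective: alternative
-- what changed: B replaces A's split-into-rows-then-nested-loop pipeline by a single character-level scanner: one pass over the stripped text with a cell buffer and a current-tag state, emitting an HTML fragment at each comma and newline boundary, with no split()/enumerate/per-cell first-row test at all.
import Mathlib
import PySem

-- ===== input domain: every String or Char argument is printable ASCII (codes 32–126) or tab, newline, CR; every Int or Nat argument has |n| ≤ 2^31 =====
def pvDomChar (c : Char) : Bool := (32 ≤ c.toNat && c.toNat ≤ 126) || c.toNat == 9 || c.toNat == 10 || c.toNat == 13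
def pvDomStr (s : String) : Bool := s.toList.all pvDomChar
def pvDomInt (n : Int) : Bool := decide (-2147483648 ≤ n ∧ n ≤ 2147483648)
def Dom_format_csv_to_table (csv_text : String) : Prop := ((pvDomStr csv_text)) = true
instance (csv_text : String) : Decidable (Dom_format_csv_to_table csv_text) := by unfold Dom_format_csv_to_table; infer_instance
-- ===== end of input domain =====

-- B replaces A's split-into-rows + nested loop by a single character-level scanner over the
-- stripped text (cell buffer + current-tag state, HTML emitted at each ',' / '\n'); same
-- output, a genuinely different traversal of the input (objective: alternative).


-- shared primitive: Python's str.split(sep) for a non-empty sep (split? is some there)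
def pvSplit (s sep : String) : List String := (PySem.Str.split? s sep).getD []

-- ===== PORT A =====
def format_csv_to_table (csv_text : String) : String :=
  let lines := pvSplit (PySem.Str.strip csv_text) "\n"
  let rows := lines.map (fun line => pvSplit line ",")
  let html := (PySem.List.enumerate rows).foldl
    (fun (html : List String) (p : Int × List String) =>
      let html := html ++ ["<tr>"]
      let html := p.2.foldl
        (fun (html : List String) (cell : String) =>
          let tag := if p.1 == 0 then "th" else "td"
          html ++ ["  <" ++ tag ++ ">" ++ PySem.Str.strip cell ++ "</" ++ tag ++ ">"])
        html
      html ++ ["</tr>"])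
    ["<table border=\"1\" style=\"border-collapse: collapse; padding: 5px;\">"]
  PySem.Str.join "\n" (html ++ ["</table>"])

-- ===== PORT B =====
-- the body of B's single for-loop over the characters (state: out, tag, cell)
def pvScanStep (s : List String × String × List Char) (ch : Char) :
    List String × String × List Char :=
  if ch == ',' then
    (s.1 ++ ["  <" ++ s.2.1 ++ ">" ++ PySem.Str.strip (String.mk s.2.2) ++ "</" ++ s.2.1 ++ ">\n"],
     s.2.1, [])
  else if ch == '\n' then
    (s.1 ++ ["  <" ++ s.2.1 ++ ">" ++ PySem.Str.strip (String.mk s.2.2) ++ "</" ++ s.2.1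
        ++ ">\n</tr>\n<tr>\n"],
     "td", [])
  else (s.1, s.2.1, s.2.2 ++ [ch])

def format_csv_to_table_alt (csv_text : String) : String :=
  let st := (PySem.Str.strip csv_text).toList.foldl pvScanStep
    (["<table border=\"1\" style=\"border-collapse: collapse; padding: 5px;\">\n<tr>\n"], "th",
      ([] : List Char))
  PySem.Str.join "" (st.1 ++ ["  <" ++ st.2.1 ++ ">" ++ PySem.Str.strip (String.mk st.2.2)
    ++ "</" ++ st.2.1 ++ ">\n</tr>\n</table>"])

-- ===== PRECONDITION & SPEC =====
def Spec_format_csv_to_table (csv_text : String) (out : String) : Prop := out = format_csv_to_table_alt csv_text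
instance (csv_text : String) (out : String) : Decidable (Spec_format_csv_to_table csv_text out) := by unfold Spec_format_csv_to_table; infer_instance

-- ===== CLAIM (what is proved, stated in full; the proofs are below) =====
def Claim_equal_format_csv_to_table : Prop := ∀ (csv_text : String), Dom_format_csv_to_table csv_text → Spec_format_csv_to_table csv_text (format_csv_to_table csv_text)

-- ===== LEMMAS AND PROOFS =====

-- split on a single character, structurally (the spec both ports are reduced to)
def sp1 (c0 : Char) : List Char → List (List Char)
  | [] => [[]]
  | c :: rest => if c == c0 then [] :: sp1 c0 rest
      else (sp1 c0 rest).modifyHead (fun x => c :: x)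

theorem sp1_ne_nil (c0 : Char) (l : List Char) : sp1 c0 l ≠ [] := by
  cases l with
  | nil => simp [sp1]
  | cons c rest =>
    rw [sp1]
    split
    · simp
    · cases h : sp1 c0 rest with
      | nil => exact absurd h (sp1_ne_nil c0 rest)
      | cons a t => simp

theorem modifyHead_nil_prefix (l : List (List Char)) :
    l.modifyHead (fun x => [] ++ x) = l := by
  cases l <;> simp

theorem go_eq_sp1 (c0 : Char) : ∀ (l : List Char) (fuel : Nat) (cur : List Char)
    (acc : List (List Char)), l.length ≤ fuel →
    PySem.Chars.splitOn.go [c0] fuel l cur acc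
      = acc.reverse ++ (sp1 c0 l).modifyHead (fun x => cur.reverse ++ x) := by
  intro l
  induction l with
  | nil => intro fuel cur acc _; cases fuel <;> simp [PySem.Chars.splitOn.go, sp1]
  | cons c rest ih =>
    intro fuel cur acc h
    cases fuel with
    | zero => simp at h
    | succ f =>
      rw [PySem.Chars.splitOn.go]
      split
      · next hpre =>
        have hc : c = c0 := by
          simp [List.isPrefixOf] at hpre
          exact hpre.symm
        subst hc
        rw [show List.drop [c].length (c :: rest) = rest from by simp]
        rw [ih f [] (cur.reverse :: acc) (by simp at h; omega)]
        have h1 : sp1 c (c :: rest) = [] :: sp1 c rest := by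
          simp only [sp1]; rw [if_pos (by simp)]
        rw [h1]
        obtain ⟨h0, t0, he⟩ := List.exists_cons_of_ne_nil (sp1_ne_nil c rest)
        rw [he]
        simp
      · next hpre =>
        have hc : ¬ c = c0 := by
          intro hh; subst hh; exact hpre (by simp [List.isPrefixOf])
        rw [ih f (c :: cur) acc (by simp at h; omega)]
        have h1 : sp1 c0 (c :: rest) = (sp1 c0 rest).modifyHead (fun x => c :: x) := by
          simp only [sp1]; rw [if_neg (by simpa using hc)]
        rw [h1]
        obtain ⟨h0, t0, he⟩ := List.exists_cons_of_ne_nil (sp1_ne_nil c0 rest)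
        rw [he]
        simp

theorem splitOn_eq_sp1 (c0 : Char) (l : List Char) :
    PySem.Chars.splitOn l [c0] = sp1 c0 l := by
  unfold PySem.Chars.splitOn
  rw [go_eq_sp1 c0 l (l.length + 1) [] [] (by omega)]
  obtain ⟨h0, t0, he⟩ := List.exists_cons_of_ne_nil (sp1_ne_nil c0 l)
  rw [he]; simp

theorem pvSplit_toList (s : String) (c0 : Char) (sep : String) (h : sep.toList = [c0]) :
    (pvSplit s sep).map String.toList = sp1 c0 s.toList := by
  have hb := PySem.Str.split?_map s sep
  rw [PySem.Chars.split?, h, if_neg (by simp)] at hb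
  cases e : PySem.Str.split? s sep with
  | none => rw [e] at hb; simp at hb
  | some l =>
    rw [e] at hb
    simp only [Option.map_some, Option.some.injEq] at hb
    simp only [pvSplit, e, Option.getD_some]
    rw [hb, splitOn_eq_sp1]

theorem joinChars_append (sep : List Char) :
    ∀ (xs ys : List (List Char)), xs ≠ [] → ys ≠ [] →
    PySem.Chars.join sep (xs ++ ys) = PySem.Chars.join sep xs ++ sep ++ PySem.Chars.join sep ys := by
  intro xs
  induction xs with
  | nil => intro ys h; simp at h
  | cons x xs ih =>
    intro ys _ hys
    cases xs with
    | nil =>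
      cases ys with
      | nil => simp at hys
      | cons y ys => simp [PySem.Chars.join_cons_cons, PySem.Chars.join_singleton]
    | cons x2 xs2 =>
      have h1 : (x2 :: xs2) ++ ys = x2 :: (xs2 ++ ys) := rfl
      calc PySem.Chars.join sep ((x :: x2 :: xs2) ++ ys)
          = x ++ sep ++ PySem.Chars.join sep ((x2 :: xs2) ++ ys) := by
            rw [List.cons_append, h1, PySem.Chars.join_cons_cons]
        _ = x ++ sep ++ (PySem.Chars.join sep (x2 :: xs2) ++ sep ++ PySem.Chars.join sep ys) := by
            rw [ih ys (by simp) hys]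
        _ = (x ++ sep ++ PySem.Chars.join sep (x2 :: xs2)) ++ sep ++ PySem.Chars.join sep ys := by
            simp [List.append_assoc]
        _ = PySem.Chars.join sep (x :: x2 :: xs2) ++ sep ++ PySem.Chars.join sep ys := by
            rw [PySem.Chars.join_cons_cons]

theorem join_cons_ne_nil (sep x : List Char) (l : List (List Char)) (h : l ≠ []) :
    PySem.Chars.join sep (x :: l) = x ++ sep ++ PySem.Chars.join sep l := by
  have := joinChars_append sep [x] l (by simp) h
  rwa [PySem.Chars.join_singleton, List.singleton_append] at this

theorem join_empty_sep : ∀ (l : List (List Char)), PySem.Chars.join [] l = l.flatten := by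
  intro l
  induction l with
  | nil => simp [PySem.Chars.join_nil]
  | cons x t ih =>
    cases t with
    | nil => simp [PySem.Chars.join_singleton]
    | cons y t2 => rw [PySem.Chars.join_cons_cons, ih]; simp

theorem toList_mk (l : List Char) : (String.mk l).toList = l :=
  Eq.symm (String.ofList_eq.mp rfl)

-- one rendered cell line, at the character level
def cellL (tag cs : List Char) : List Char :=
  "  <".toList ++ tag ++ ">".toList ++ PySem.Chars.strip cs ++ "</".toList ++ tag ++ ">".toList

-- the list of HTML lines after the opening "<table…>\n<tr>\n", given the rows of cells
def blocksC (tag : List Char) : List (List (List Char)) → List (List Char)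
  | [] => ["</table>".toList]
  | r :: rs => r.map (cellL tag) ++ ["</tr>".toList]
      ++ rs.flatMap (fun r' => "<tr>".toList :: (r'.map (cellL "td".toList) ++ ["</tr>".toList]))
      ++ ["</table>".toList]

theorem blocksC_ne_nil (tag : List Char) (rows : List (List (List Char))) :
    blocksC tag rows ≠ [] := by
  cases rows <;> simp [blocksC]

-- what the finishing join of B's scanner yields, at the character level
def pvOut (st : List String × String × List Char) : List Char :=
  (st.1.map String.toList).flatten ++ cellL st.2.1.toList st.2.2 ++ "\n</tr>\n</table>".toList

theorem finish_toList (st : List String × String × List Char) :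
    (PySem.Str.join "" (st.1 ++ ["  <" ++ st.2.1 ++ ">" ++ PySem.Str.strip (String.mk st.2.2)
      ++ "</" ++ st.2.1 ++ ">\n</tr>\n</table>"])).toList = pvOut st := by
  rw [PySem.Str.toList_join]
  rw [show ("" : String).toList = [] from rfl, join_empty_sep]
  simp [pvOut, cellL, List.append_assoc, toList_mk]

theorem scan_main : ∀ (t : List Char) (out : List String) (tag : String) (cell : List Char),
    pvOut (t.foldl pvScanStep (out, tag, cell))
      = (out.map String.toList).flatten
        ++ PySem.Chars.join "\n".toList (blocksC tag.toList
            (((sp1 '\n' t).map (sp1 ',')).modifyHead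
              (List.modifyHead (fun x => cell ++ x)))) := by
  intro t
  induction t with
  | nil =>
    intro out tag cell
    simp only [List.foldl_nil, sp1, List.map_cons, List.map_nil, List.modifyHead_cons,
      List.append_nil]
    have hb : blocksC tag.toList [[cell]]
        = [cellL tag.toList cell, "</tr>".toList, "</table>".toList] := by
      simp [blocksC]
    rw [hb, PySem.Chars.join_cons_cons, PySem.Chars.join_cons_cons, PySem.Chars.join_singleton]
    simp [pvOut, List.append_assoc]
  | cons c rest ih =>
    intro out tag cell
    rw [List.foldl_cons]
    by_cases hc : c = ','
    · subst hc
      rw [show pvScanStep (out, tag, cell) ',' = (out ++ ["  <" ++ tag ++ ">"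
          ++ PySem.Str.strip (String.mk cell) ++ "</" ++ tag ++ ">\n"], tag, []) from rfl]
      rw [ih]
      obtain ⟨l0, ls, he⟩ := List.exists_cons_of_ne_nil (sp1_ne_nil '\n' rest)
      rw [he]
      rw [show sp1 '\n' (',' :: rest) = (',' :: l0) :: ls by
        simp only [sp1]; rw [if_neg (by decide), he]; simp]
      simp only [List.map_cons]
      rw [show sp1 ',' (',' :: l0) = [] :: sp1 ',' l0 by
        simp only [sp1]; rw [if_pos (by decide)]]
      simp only [List.modifyHead_cons, modifyHead_nil_prefix]
      simp only [List.append_nil]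
      rw [show blocksC tag.toList ((cell :: sp1 ',' l0) :: ls.map (sp1 ','))
            = cellL tag.toList cell :: blocksC tag.toList (sp1 ',' l0 :: ls.map (sp1 ',')) by
          simp [blocksC]]
      rw [join_cons_ne_nil _ _ _ (blocksC_ne_nil _ _)]
      simp [cellL, List.append_assoc, toList_mk]
    · by_cases hn : c = '\n'
      · subst hn
        rw [show pvScanStep (out, tag, cell) '\n' = (out ++ ["  <" ++ tag ++ ">"
            ++ PySem.Str.strip (String.mk cell) ++ "</" ++ tag ++ ">\n</tr>\n<tr>\n"], "td", [])
          from rfl]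
        rw [ih]
        rw [show sp1 '\n' ('\n' :: rest) = [] :: sp1 '\n' rest by
          simp only [sp1]; rw [if_pos (by decide)]]
        obtain ⟨l0, ls, he⟩ := List.exists_cons_of_ne_nil (sp1_ne_nil '\n' rest)
        rw [he]
        simp only [List.map_cons, List.modifyHead_cons, modifyHead_nil_prefix]
        rw [show sp1 ',' [] = [[]] from rfl]
        simp only [List.modifyHead_cons, List.append_nil]
        rw [show blocksC tag.toList ([cell] :: sp1 ',' l0 :: ls.map (sp1 ','))
              = cellL tag.toList cell :: "</tr>".toList :: "<tr>".toList
                  :: blocksC "td".toList (sp1 ',' l0 :: ls.map (sp1 ',')) by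
            simp [blocksC]]
        rw [join_cons_ne_nil _ _ _ (by simp), join_cons_ne_nil _ _ _ (by simp),
            join_cons_ne_nil _ _ _ (blocksC_ne_nil _ _)]
        simp [cellL, List.append_assoc, toList_mk]
      · rw [show pvScanStep (out, tag, cell) c = (out, tag, cell ++ [c]) by
          simp [pvScanStep, hc, hn]]
        rw [ih]
        obtain ⟨l0, ls, he⟩ := List.exists_cons_of_ne_nil (sp1_ne_nil '\n' rest)
        rw [he]
        rw [show sp1 '\n' (c :: rest) = (c :: l0) :: ls by
          simp only [sp1]; rw [if_neg (by simpa using hn), he]; simp]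
        simp only [List.map_cons]
        obtain ⟨e0, es, he2⟩ := List.exists_cons_of_ne_nil (sp1_ne_nil ',' l0)
        rw [show sp1 ',' (c :: l0) = (c :: e0) :: es by
          simp only [sp1]; rw [if_neg (by simpa using hc), he2]; simp]
        rw [he2]
        simp [List.append_assoc]

-- A-side machinery (the flat list of lines A's foldl builds)
def pvCell (tag cell : String) : String :=
  "  <" ++ tag ++ ">" ++ PySem.Str.strip cell ++ "</" ++ tag ++ ">"

def pvBlock (tag : String) (row : List String) : List String :=
  "<tr>" :: row.map (pvCell tag) ++ ["</tr>"]

theorem inner_foldl (p : Int × List String) (acc : List String) :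
    p.2.foldl
      (fun (html : List String) (cell : String) =>
        html ++ ["  <" ++ (if p.1 == 0 then "th" else "td") ++ ">" ++ PySem.Str.strip cell ++
          "</" ++ (if p.1 == 0 then "th" else "td") ++ ">"])
      acc = acc ++ p.2.map (pvCell (if p.1 == 0 then "th" else "td")) := by
  show p.2.foldl
      (fun (html : List String) (cell : String) =>
        html ++ [pvCell (if p.1 == 0 then "th" else "td") cell]) acc = _
  rw [PySem.List.foldl_append_eq_flatMap]
  congr 1
  induction p.2 with
  | nil => simp
  | cons a l ih =>
    rw [List.flatMap_cons, ih]
    simp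

theorem outer_foldl (l : List (Int × List String)) (acc : List String) :
    l.foldl
      (fun (html : List String) (p : Int × List String) =>
        (p.2.foldl
          (fun (html : List String) (cell : String) =>
            html ++ ["  <" ++ (if p.1 == 0 then "th" else "td") ++ ">" ++ PySem.Str.strip cell ++
              "</" ++ (if p.1 == 0 then "th" else "td") ++ ">"])
          (html ++ ["<tr>"])) ++ ["</tr>"])
      acc = acc ++ l.flatMap (fun p => pvBlock (if p.1 == 0 then "th" else "td") p.2) := by
  induction l generalizing acc with
  | nil => simp
  | cons p l ih =>
    simp only [List.foldl_cons, List.flatMap_cons]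
    rw [inner_foldl, ih]
    simp [pvBlock]

theorem enum_td (rs : List (List String)) :
    ∀ (k : Int), 1 ≤ k →
    (PySem.List.enumerate rs k).flatMap
        (fun p => pvBlock (if p.1 == 0 then "th" else "td") p.2)
      = rs.flatMap (fun r => pvBlock "td" r) := by
  induction rs with
  | nil => intro k _; simp [PySem.List.enumerate]
  | cons r rs ih =>
    intro k hk
    have hk0 : (k == 0) = false := by simp; omega
    simp only [PySem.List.enumerate, List.flatMap_cons, hk0]
    rw [ih (k + 1) (by omega)]
    simp

theorem pvCell_toList (tag cell : String) :
    (pvCell tag cell).toList = cellL tag.toList cell.toList := by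
  simp [pvCell, cellL, List.append_assoc]

theorem blockTd_toList (rest : List (List String)) :
    (rest.flatMap (pvBlock "td")).map String.toList
      = (rest.map (fun r => r.map String.toList)).flatMap
          (fun r' => "<tr>".toList :: (r'.map (cellL "td".toList) ++ ["</tr>".toList])) := by
  have hc : String.toList ∘ pvCell "td" = cellL "td".toList ∘ String.toList :=
    funext (fun s => pvCell_toList "td" s)
  induction rest with
  | nil => rfl
  | cons r rs ih =>
    simp only [List.flatMap_cons, List.map_append, List.map_cons, ih, pvBlock, List.map_map,
      List.map_nil, hc]
    simp [List.append_assoc]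

theorem mapToList_blocks (r0 : List String) (rest : List (List String)) :
    (r0.map (pvCell "th") ++ ["</tr>"] ++ rest.flatMap (pvBlock "td")
        ++ ["</table>"]).map String.toList
      = blocksC "th".toList
          (r0.map String.toList :: rest.map (fun r => r.map String.toList)) := by
  have hth : String.toList ∘ pvCell "th" = cellL "th".toList ∘ String.toList :=
    funext (fun s => pvCell_toList "th" s)
  simp only [blocksC, List.map_append, List.map_cons, List.map_nil, List.map_map, hth,
    blockTd_toList]

theorem rowsC_eq (s : String) :
    (sp1 '\n' s.toList).map (sp1 ',')
      = ((pvSplit s "\n").map (fun line => pvSplit line ",")).map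
          (fun r => r.map String.toList) := by
  rw [← pvSplit_toList s '\n' "\n" (by decide)]
  simp only [List.map_map]
  apply List.map_congr_left
  intro line _
  simp [Function.comp, ← pvSplit_toList line ',' "," (by decide)]

theorem modifyHead_id_rows (rows : List (List (List Char))) :
    List.modifyHead (List.modifyHead (fun x => ([] : List Char) ++ x)) rows = rows := by
  cases rows with
  | nil => rfl
  | cons a t => cases a <;> simp

theorem main_eq (csv_text : String) :
    format_csv_to_table csv_text = format_csv_to_table_alt csv_text := by
  apply String.toList_inj.mp
  have hlne : pvSplit (PySem.Str.strip csv_text) "\n" ≠ [] := by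
    intro h
    have hh := pvSplit_toList (PySem.Str.strip csv_text) '\n' "\n" (by decide)
    rw [h] at hh
    exact sp1_ne_nil '\n' (PySem.Str.strip csv_text).toList (by simpa using hh.symm)
  obtain ⟨l0, lrest, hl⟩ := List.exists_cons_of_ne_nil hlne
  have hrows : (pvSplit (PySem.Str.strip csv_text) "\n").map (fun line => pvSplit line ",")
      = pvSplit l0 "," :: lrest.map (fun line => pvSplit line ",") := by
    rw [hl]; simp
  -- A reduced to the flat list of lines
  have hA : format_csv_to_table csv_text
      = PySem.Str.join "\n"
          ((["<table border=\"1\" style=\"border-collapse: collapse; padding: 5px;\">"]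
            ++ (pvBlock "th" (pvSplit l0 ",")
                ++ (lrest.map (fun line => pvSplit line ",")).flatMap
                    (fun r => pvBlock "td" r))) ++ ["</table>"]) := by
    simp only [format_csv_to_table]
    rw [hrows]
    have henum : PySem.List.enumerate (pvSplit l0 "," :: lrest.map (fun line => pvSplit line ","))
        = (0, pvSplit l0 ",") :: PySem.List.enumerate (lrest.map (fun line => pvSplit line ",")) 1 := by
      simp [PySem.List.enumerate]
    rw [outer_foldl, henum, List.flatMap_cons, enum_td _ 1 (by norm_num)]
    simp [pvBlock]
  -- B reduced to opener ++ join of blocks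
  have hB : (format_csv_to_table_alt csv_text).toList
      = ("<table border=\"1\" style=\"border-collapse: collapse; padding: 5px;\">\n<tr>\n").toList
        ++ PySem.Chars.join "\n".toList
            (blocksC "th".toList ((sp1 '\n' (PySem.Str.strip csv_text).toList).map (sp1 ','))) := by
    simp only [format_csv_to_table_alt]
    rw [finish_toList, scan_main, modifyHead_id_rows]
    simp
  rw [hA, hB, rowsC_eq, hrows]
  rw [PySem.Str.toList_join]
  have hshape : (["<table border=\"1\" style=\"border-collapse: collapse; padding: 5px;\">"]
      ++ (pvBlock "th" (pvSplit l0 ",")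
          ++ (lrest.map (fun line => pvSplit line ",")).flatMap (fun r => pvBlock "td" r))
      ++ ["</table>"])
      = "<table border=\"1\" style=\"border-collapse: collapse; padding: 5px;\">" :: "<tr>"
        :: ((pvSplit l0 ",").map (pvCell "th") ++ ["</tr>"]
            ++ (lrest.map (fun line => pvSplit line ",")).flatMap (fun r => pvBlock "td" r)
            ++ ["</table>"]) := by
    simp [pvBlock, List.append_assoc]
  rw [hshape]
  simp only [List.map_cons]
  rw [mapToList_blocks]
  rw [join_cons_ne_nil _ _ _ (by simp), join_cons_ne_nil _ _ _ (blocksC_ne_nil _ _)]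
  have hopener : ("<table border=\"1\" style=\"border-collapse: collapse; padding: 5px;\">\n<tr>\n").toList
      = ("<table border=\"1\" style=\"border-collapse: collapse; padding: 5px;\">").toList
        ++ "\n".toList ++ "<tr>".toList ++ "\n".toList := by decide
  rw [hopener]
  simp [List.map_map]

-- ===== VERDICT (by name: the statement is the Claim_ definition above) =====
theorem format_csv_to_table_spec : Claim_equal_format_csv_to_table := by
  intro csv_text _
  unfold Spec_format_csv_to_table
  exact main_eq csv_text
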